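-- pv_equiv track=rewrite | github.com/greatabel/HXAPC | i4split.py | process
-- ===== SOURCE A (Python) =====
-- def process(lines):
--     rows0, rows1 = [], []
--     for i in range(0, len(lines)):
--
--         if i % 5 == 0:
--             rows1.append(lines[i])
--         else:
--             rows0.append(lines[i])
--     return rows0, rows1
-- ===== SOURCE B (Python) =====
-- def process(lines):
--     rows0, rows1 = [], []
--     for j in range(0, len(lines), 5):
--         chunk = lines[j:j+5]
--         rows1.append(chunk[0])
--         rows0 += chunk[1:]
--     return rows0, rows1
-- ===== Notes on version B (the rewrite author's own statement) =====
-- stated objective: alternative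
-- what changed: Replaces the per-index loop with an i%5 test by an outer loop over blocks of 5 taken with a step-5 range, putting each chunk's head into rows1 and its tail into rows0 via slices.
import Mathlib
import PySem

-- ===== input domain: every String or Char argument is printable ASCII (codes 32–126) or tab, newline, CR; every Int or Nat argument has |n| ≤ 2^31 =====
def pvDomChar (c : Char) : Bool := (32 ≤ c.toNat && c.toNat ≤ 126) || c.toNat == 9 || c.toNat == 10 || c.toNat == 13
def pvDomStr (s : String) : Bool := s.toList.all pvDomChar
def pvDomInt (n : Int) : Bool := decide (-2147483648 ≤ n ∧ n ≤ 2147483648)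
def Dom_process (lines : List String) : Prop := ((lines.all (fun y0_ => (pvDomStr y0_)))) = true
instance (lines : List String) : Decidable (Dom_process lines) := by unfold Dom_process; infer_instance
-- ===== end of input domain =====

-- B iterates over blocks of 5 with a step-5 range and slices (head → rows1, tail → rows0)
-- instead of A's per-index i%5 test: an alternative decomposition, same cost.

-- ===== PORT A =====
def process (lines : List String) : List String × List String :=
  (PySem.List.pyRange 0 (PySem.List.len lines) 1).foldl
    (fun r i =>
      if PySem.Int.mod i 5 = 0 then (r.1, r.2 ++ [PySem.List.pyGetD lines i ""])
      else (r.1 ++ [PySem.List.pyGetD lines i ""], r.2))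
    ([], [])

-- ===== PORT B =====
def process_alt (lines : List String) : List String × List String :=
  (PySem.List.pyRange 0 (PySem.List.len lines) 5).foldl
    (fun r j =>
      let chunk := PySem.List.slice lines (some j) (some (j + 5))
      (r.1 ++ PySem.List.slice chunk (some 1) none, r.2 ++ [PySem.List.pyGetD chunk 0 ""]))
    ([], [])

-- ===== PRECONDITION & SPEC =====
def Spec_process (lines : List String) (out : List String × List String) : Prop := out = process_alt lines
instance (lines : List String) (out : List String × List String) : Decidable (Spec_process lines out) := by unfold Spec_process; infer_instance

-- ===== CLAIM (what is proved, stated in full; the proofs are below) =====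
def Claim_equal_process : Prop := ∀ (lines : List String), Dom_process lines → Spec_process lines (process lines)

-- ===== LEMMAS AND PROOFS =====

-- common reference shape: head of each 5-block, and the rest of the block
def chunkSpec : List String → List String × List String
  | [] => ([], [])
  | x :: rest =>
      let p := chunkSpec (rest.drop 4)
      (rest.take 4 ++ p.1, x :: p.2)
termination_by ls => ls.length
decreasing_by simp

-- A's loop body, on enumerated pairs
theorem chunkSpec_nil : chunkSpec [] = ([], []) := by rw [chunkSpec]

theorem chunkSpec_cons (x : String) (rest : List String) :
    chunkSpec (x :: rest)
      = (rest.take 4 ++ (chunkSpec (rest.drop 4)).1, x :: (chunkSpec (rest.drop 4)).2) := by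
  rw [chunkSpec]

def pvStep (r : List String × List String) (p : Int × String) : List String × List String :=
  if PySem.Int.mod p.1 5 = 0 then (r.1, r.2 ++ [p.2]) else (r.1 ++ [p.2], r.2)

theorem pvA_eq_enum (lines : List String) :
    process lines = (PySem.List.enumerate lines 0).foldl pvStep ([], []) := by
  rw [PySem.List.enumerate_eq_map_pyRange lines "", List.foldl_map]
  rfl

theorem pvFoldl_noHit : ∀ (t : List String) (s : Int) (r0 r1 : List String),
    (∀ j : Int, s ≤ j → j < s + t.length → ¬ (5 ∣ j)) →
    (PySem.List.enumerate t s).foldl pvStep (r0, r1) = (r0 ++ t, r1) := by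
  intro t
  induction t with
  | nil => intro s r0 r1 _; simp [PySem.List.enumerate_nil]
  | cons x xs ih =>
    intro s r0 r1 h
    rw [PySem.List.enumerate_cons, List.foldl_cons]
    have hs : ¬ (5 ∣ s) := h s le_rfl (by simp only [List.length_cons]; push_cast; omega)
    have h1 : pvStep (r0, r1) (s, x) = (r0 ++ [x], r1) := by
      simp [pvStep, hs]
    rw [h1, ih (s + 1) (r0 ++ [x]) r1 ?_]
    · simp
    · intro j hj1 hj2
      exact h j (by omega) (by simp only [List.length_cons] at hj2 ⊢; push_cast at hj2 ⊢; omega)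

theorem pvA_chunks : ∀ (n : Nat) (ls : List String), ls.length ≤ n →
    ∀ (i : Nat) (r0 r1 : List String),
    (PySem.List.enumerate ls (5 * (i : Int))).foldl pvStep (r0, r1)
      = (r0 ++ (chunkSpec ls).1, r1 ++ (chunkSpec ls).2) := by
  intro n
  induction n with
  | zero =>
    intro ls h i r0 r1
    have : ls = [] := List.eq_nil_of_length_eq_zero (Nat.le_zero.mp h)
    subst this
    simp [chunkSpec_nil, PySem.List.enumerate_nil]
  | succ n ih =>
    intro ls h i r0 r1
    match ls with
    | [] => simp [chunkSpec_nil, PySem.List.enumerate_nil]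
    | x :: rest =>
      rw [PySem.List.enumerate_cons, List.foldl_cons]
      have h0 : pvStep (r0, r1) (5 * (i : Int), x) = (r0, r1 ++ [x]) := by
        simp [pvStep]
      rw [h0]
      rw [show PySem.List.enumerate rest (5 * (i : Int) + 1)
            = PySem.List.enumerate (rest.take 4 ++ rest.drop 4) (5 * (i : Int) + 1) by
          rw [List.take_append_drop]]
      rw [PySem.List.enumerate_append, List.foldl_append]
      have htk : (rest.take 4).length ≤ 4 := by simp
      rw [pvFoldl_noHit (rest.take 4) _ r0 (r1 ++ [x])
          (by intro j hj1 hj2; omega)]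
      by_cases h4 : 4 ≤ rest.length
      · have hlen : (rest.take 4).length = 4 := by simp [h4]
        have hst : (5 * (i : Int) + 1 + ((rest.take 4).length : Int))
            = 5 * ((i + 1 : Nat) : Int) := by rw [hlen]; push_cast; ring
        rw [hst, ih (rest.drop 4) (by simp at h ⊢; omega) (i + 1)]
        simp [chunkSpec_cons]
      · have hd : rest.drop 4 = [] := by
          rw [List.drop_eq_nil_iff]; omega
        rw [hd]
        simp [chunkSpec_cons, chunkSpec_nil, PySem.List.enumerate_nil, hd,
              List.take_of_length_le (by omega : rest.length ≤ 4)]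

-- B's range rewritten as a Nat range over block indices
theorem pvRange5 (nn : Nat) :
    PySem.List.pyRange 0 (nn : Int) 5
      = (List.range ((nn + 4) / 5)).map (fun k => ((5 * k : Nat) : Int)) := by
  rw [PySem.List.pyRange_of_pos 0 (nn : Int) (by norm_num)]
  have hc : (if (0 : Int) < (nn : Int) then (((nn : Int) - 0 + 5 - 1) / 5).toNat else 0)
      = (nn + 4) / 5 := by
    split_ifs with hp
    · omega
    · omega
  rw [hc]
  apply List.map_congr_left
  intro k _
  push_cast
  ring

theorem pvB_chunks : ∀ (n : Nat) (ls : List String), ls.length ≤ n →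
    ∀ (r0 r1 : List String),
    (List.range ((ls.length + 4) / 5)).foldl
      (fun r k =>
        ((r.1 ++ ((ls.drop (5 * k)).take 5).tail,
          r.2 ++ [((ls.drop (5 * k)).take 5).getD 0 ""]) : List String × List String))
      (r0, r1)
      = (r0 ++ (chunkSpec ls).1, r1 ++ (chunkSpec ls).2) := by
  intro n
  induction n with
  | zero =>
    intro ls h r0 r1
    have : ls = [] := List.eq_nil_of_length_eq_zero (Nat.le_zero.mp h)
    subst this
    simp [chunkSpec_nil]
  | succ n ih =>
    intro ls h r0 r1
    match ls with
    | [] => simp [chunkSpec_nil]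
    | x :: rest =>
      have hm : ((x :: rest).length + 4) / 5
          = ((rest.drop 4).length + 4) / 5 + 1 := by simp; omega
      rw [hm, List.range_succ_eq_map, List.foldl_cons, List.foldl_map]
      have h0 : ((x :: rest).drop (5 * 0)).take 5 = x :: rest.take 4 := by simp
      rw [show (5 * 0 : Nat) = 0 by ring] at h0 ⊢
      simp only [List.drop_zero, List.take_succ_cons]
      have hshift :
          (fun (r : List String × List String) (k : Nat) =>
            ((r.1 ++ (((x :: rest).drop (5 * (k + 1))).take 5).tail,
              r.2 ++ [(((x :: rest).drop (5 * (k + 1))).take 5).getD 0 ""]) :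
              List String × List String))
          = (fun (r : List String × List String) (k : Nat) =>
            ((r.1 ++ (((rest.drop 4).drop (5 * k)).take 5).tail,
              r.2 ++ [(((rest.drop 4).drop (5 * k)).take 5).getD 0 ""]) :
              List String × List String)) := by
        funext r k
        have : (x :: rest).drop (5 * (k + 1)) = (rest.drop 4).drop (5 * k) := by
          rw [List.drop_drop, show 5 * (k + 1) = (4 + 5 * k) + 1 by ring,
              List.drop_succ_cons]
        rw [this]
      rw [hshift, ih (rest.drop 4) (by simp at h ⊢; omega)]
      simp [chunkSpec_cons]

theorem pvB_eq (lines : List String) :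
    process_alt lines = ((chunkSpec lines).1, (chunkSpec lines).2) := by
  unfold process_alt
  rw [PySem.List.len_eq, pvRange5, List.foldl_map]
  have hbody :
      (fun (r : List String × List String) (k : Nat) =>
        (fun (r : List String × List String) (j : Int) =>
          let chunk := PySem.List.slice lines (some j) (some (j + 5))
          ((r.1 ++ PySem.List.slice chunk (some 1) none,
            r.2 ++ [PySem.List.pyGetD chunk 0 ""]) : List String × List String))
          r ((5 * k : Nat) : Int))
      = (fun (r : List String × List String) (k : Nat) =>
        ((r.1 ++ ((lines.drop (5 * k)).take 5).tail,
          r.2 ++ [((lines.drop (5 * k)).take 5).getD 0 ""]) : List String × List String)) := by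
    funext r k
    have hsl : PySem.List.slice lines (some ((5 * k : Nat) : Int)) (some (((5 * k : Nat) : Int) + 5))
        = (lines.drop (5 * k)).take 5 := by
      rw [show (((5 * k : Nat) : Int) + 5) = (((5 * k : Nat) : Int) + ((5 : Nat) : Int)) by norm_num]
      exact PySem.List.slice_natCast_add lines (5 * k) 5
    simp only [hsl, PySem.List.slice_from_one]
    rw [show (0 : Int) = ((0 : Nat) : Int) by norm_num, PySem.List.pyGetD_natCast]
  rw [hbody, pvB_chunks lines.length lines le_rfl [] []]
  simp

-- ===== VERDICT (by name: the statement is the Claim_ definition above) =====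
theorem process_spec : Claim_equal_process := by
  intro lines _
  unfold Spec_process
  rw [pvA_eq_enum, pvB_eq]
  have := pvA_chunks lines.length lines le_rfl 0 [] []
  simpa using this
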